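-- pv_equiv track=rewrite | github.com/Basekick-Labs/arc | ingest/arrow_writer.py | _merge_columnar_records
-- ===== SOURCE A (Python) =====
-- from typing import List, Dict, Any
--
-- def _merge_columnar_records(records: List[Dict[str, Any]]) -> Dict[str, List]:
--     """
--     Merge multiple columnar batches into single columnar dict.
--
--     Input: [
--         {_columnar: True, columns: {time: [1,2], val: [10,20]}},
--         {_columnar: True, columns: {time: [3,4], val: [30,40]}}
--     ]
--     Output: {time: [1,2,3,4], val: [10,20,30,40]}
--
--     OPTIMIZATION: Zero-copy merge - just concatenate arrays.
--     """
--     if not records: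
--         return {}
--
--     # Get all column names from first record
--     first_columns = records[0]['columns']
--     merged = {key: [] for key in first_columns.keys()}
--
--     # Concatenate arrays from all batches
--     for record in records:
--         columns = record['columns']
--         for key, values in columns.items():
--             if key not in merged:
--                 # New column appeared in later batch (schema evolution)
--                 merged[key] = []
--             merged[key].extend(values)
--
--     return merged
-- ===== SOURCE B (Python) =====
-- def _merge_columnar_records(records):
--     # Column-major merge: fix the key order first (first-seen order across all
--     # batches), then build each merged column with one comprehension per key.
--     key_order = dict.fromkeys(k for rec in records for k in rec['columns'])
--     return {key: [v for rec in records
--                     for k2, vs in rec['columns'].items() if k2 == key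
--                     for v in vs]
--             for key in key_order}
-- ===== Notes on version B (the rewrite author's own statement) =====
-- stated objective: alternative
-- what changed: Record-major nested extend into a growing dict is replaced by a two-phase column-major build: one pass computes the ordered key list (dict.fromkeys), then each merged column is produced by a single comprehension over all records.
import Mathlib
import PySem

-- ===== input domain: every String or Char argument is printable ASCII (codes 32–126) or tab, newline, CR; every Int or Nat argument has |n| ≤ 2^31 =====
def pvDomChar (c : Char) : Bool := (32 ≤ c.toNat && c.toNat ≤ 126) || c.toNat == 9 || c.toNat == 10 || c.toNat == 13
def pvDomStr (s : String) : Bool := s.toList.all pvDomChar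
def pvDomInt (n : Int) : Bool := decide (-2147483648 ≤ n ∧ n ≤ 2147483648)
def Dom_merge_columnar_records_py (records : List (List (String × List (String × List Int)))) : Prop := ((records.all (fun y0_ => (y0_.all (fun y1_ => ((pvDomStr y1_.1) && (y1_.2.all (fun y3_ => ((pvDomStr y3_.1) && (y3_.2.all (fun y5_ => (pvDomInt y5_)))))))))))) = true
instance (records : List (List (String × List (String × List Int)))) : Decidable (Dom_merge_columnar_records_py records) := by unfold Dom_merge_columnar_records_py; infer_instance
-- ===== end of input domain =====

-- B merges column-major (key order fixed first, then one concatenation pass per key)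
-- instead of A's record-major growing-dict extend; equal return values are proved on Pre_.


-- record['columns']: first-match dict lookup; the [] default is never reached under
-- Pre_ (Python raises KeyError exactly where find? is none, and Pre_ excludes that).
def pvCols (rec : List (String × List (String × List Int))) : List (String × List Int) :=
  ((rec.find? (fun p => p.1 == "columns")).map (·.2)).getD []

-- ===== PORT A =====
def merge_columnar_records_py (records : List (List (String × List (String × List Int)))) : List (String × List Int) :=
  match records with
  | [] => []                                     -- if not records: return {}
  | first :: _ =>
    let first_columns := pvCols first
    -- merged = {key: [] for key in first_columns.keys()}
    let merged : PySem.Dict String (List Int) :=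
      first_columns.foldl (fun d p => d.insert p.1 []) PySem.Dict.empty
    -- for record in records: for key, values in columns.items():
    --   'if key not in merged: merged[key] = []' then 'merged[key].extend(values)'
    --   is Dict.modify key [] (· ++ values)  (d[k] = d.get(k, []) + values, position kept)
    let merged := records.foldl
      (fun m record =>
        (pvCols record).foldl (fun m kv => m.modify kv.1 [] (· ++ kv.2)) m) merged
    merged.items

-- ===== PORT B =====
def merge_columnar_records_py_alt (records : List (List (String × List (String × List Int)))) : List (String × List Int) :=
  -- key_order = dict.fromkeys(k for rec in records for k in rec['columns'])
  let key_order :=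
    PySem.List.dedup (records.flatMap (fun rec => (pvCols rec).map (·.1)))
  -- {key: [v for rec in records for k2, vs in rec['columns'].items() if k2 == key for v in vs] for key in key_order}
  key_order.map (fun key =>
    (key, records.flatMap (fun rec =>
            (pvCols rec).flatMap (fun kv => if kv.1 == key then kv.2 else []))))

-- ===== PRECONDITION & SPEC =====
-- Pre_ excludes exactly the inputs where the Python A raises KeyError: a record without a "columns" key.
def Pre_merge_columnar_records_py (records : List (List (String × List (String × List Int)))) : Prop :=
  records.all (fun rec => rec.any (fun p => p.1 == "columns")) = true
instance (records : List (List (String × List (String × List Int)))) : Decidable (Pre_merge_columnar_records_py records) := by unfold Pre_merge_columnar_records_py; infer_instance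

def pvWitness_merge_columnar_records_py : (List (List (String × List (String × List Int)))) :=
  [[("columns", [("time", [1, 2]), ("val", [10, 20])])],
   [("columns", [("time", [3]), ("extra", [7])])]]

def Spec_merge_columnar_records_py (records : List (List (String × List (String × List Int)))) (out : List (String × List Int)) : Prop := out = merge_columnar_records_py_alt records
instance (records : List (List (String × List (String × List Int)))) (out : List (String × List Int)) : Decidable (Spec_merge_columnar_records_py records out) := by unfold Spec_merge_columnar_records_py; infer_instance

-- ===== CLAIM (what is proved, stated in full; the proofs are below) =====
def Claim_equal_merge_columnar_records_py : Prop := ∀ (records : List (List (String × List (String × List Int)))), Dom_merge_columnar_records_py records → Pre_merge_columnar_records_py records → Spec_merge_columnar_records_py records (merge_columnar_records_py records)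

-- ===== LEMMAS AND PROOFS =====

-- one record's inner loop: what it appends to the column of key k
theorem pv_getD_inner (l : List (String × List Int)) (d : PySem.Dict String (List Int)) (k : String) :
    (l.foldl (fun m kv => m.modify kv.1 [] (· ++ kv.2)) d).getD k [] =
      d.getD k [] ++ l.flatMap (fun kv => if kv.1 == k then kv.2 else []) := by
  induction l generalizing d with
  | nil => simp
  | cons p t ih =>
    simp only [List.foldl_cons, List.flatMap_cons, ih, PySem.Dict.getD_modify]
    by_cases h : k = p.1
    · subst h; simp
    · have h' : (p.1 == k) = false := by simp; exact fun e => h e.symm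
      simp [h, h']

-- the outer loop over all records: columns concatenate record by record
theorem pv_getD_outer (rs : List (List (String × List (String × List Int))))
    (d : PySem.Dict String (List Int)) (k : String) :
    (rs.foldl (fun m record =>
        (pvCols record).foldl (fun m kv => m.modify kv.1 [] (· ++ kv.2)) m) d).getD k [] =
      d.getD k [] ++ rs.flatMap (fun rec =>
        (pvCols rec).flatMap (fun kv => if kv.1 == k then kv.2 else [])) := by
  induction rs generalizing d with
  | nil => simp
  | cons r t ih => simp [ih, pv_getD_inner]

-- the seeding pass {key: [] for key in first_columns} leaves every column empty
theorem pv_getD_init (l : List (String × List Int)) (d : PySem.Dict String (List Int)) (k : String)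
    (h : d.getD k [] = []) :
    (l.foldl (fun d p => d.insert p.1 ([] : List Int)) d).getD k [] = [] := by
  induction l generalizing d with
  | nil => exact h
  | cons p t ih =>
    refine ih _ ?_
    rw [PySem.Dict.getD_insert]
    split_ifs with hk
    · rfl
    · exact h

-- keys after the outer loop: the starting keys updated with every record's key list
theorem pv_keys_outer (rs : List (List (String × List (String × List Int))))
    (d : PySem.Dict String (List Int)) :
    (rs.foldl (fun m record =>
        (pvCols record).foldl (fun m kv => m.modify kv.1 [] (· ++ kv.2)) m) d).keys =
      PySem.Set.update d.keys (rs.flatMap (fun rec => (pvCols rec).map (·.1))) := by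
  induction rs generalizing d with
  | nil => simp
  | cons r t ih =>
    rw [List.foldl_cons, ih, PySem.Dict.keys_foldl_modify_key, List.flatMap_cons,
        PySem.Set.update_append]

theorem pv_update_ofList_self (xs : List String) :
    PySem.Set.update (PySem.Set.ofList xs) xs = PySem.Set.ofList xs := by
  rw [PySem.Set.update_eq_append_filter]
  have : (PySem.Set.ofList xs).filter
      (fun y => !(PySem.Set.contains (PySem.Set.ofList xs) y)) = [] := by
    rw [List.filter_eq_nil_iff]
    intro y hy
    simp only [PySem.Set.contains_eq_listContains, Bool.not_eq_true', Bool.not_eq_false]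
    simpa using hy
  rw [this, List.append_nil]

theorem merge_columnar_records_py_spec : Claim_equal_merge_columnar_records_py := by
  intro records _ _
  unfold Spec_merge_columnar_records_py
  cases records with
  | nil => rfl
  | cons first rest =>
    show (((first :: rest).foldl
        (fun m record => (pvCols record).foldl (fun m kv => m.modify kv.1 [] (· ++ kv.2)) m)
        ((pvCols first).foldl (fun d p => d.insert p.1 []) PySem.Dict.empty)).items) = _
    set d0 : PySem.Dict String (List Int) :=
      (pvCols first).foldl (fun d p => d.insert p.1 []) PySem.Dict.empty with hd0
    set F := fun m record => (pvCols record).foldl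
      (fun (m : PySem.Dict String (List Int)) kv => m.modify kv.1 [] (· ++ kv.2)) m with hF
    -- keys of the seed dict
    have hkeys0 : d0.keys = PySem.Set.ofList ((pvCols first).map (·.1)) := by
      rw [hd0, PySem.Dict.keys_foldl_insert_key, PySem.Dict.keys_empty,
          PySem.Set.update_nil_left]
    -- keys of the final dict = ordered dedup of all key lists
    have hkeys : ((first :: rest).foldl F d0).keys =
        PySem.Set.ofList ((first :: rest).flatMap (fun rec => (pvCols rec).map (·.1))) := by
      rw [hF, pv_keys_outer, hkeys0, List.flatMap_cons, PySem.Set.update_append,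
          pv_update_ofList_self, ← PySem.Set.ofList_append]
    have hnd : ((first :: rest).foldl F d0).keys.Nodup := by
      rw [hkeys]; exact PySem.Set.nodup_ofList _
    rw [PySem.Dict.items_eq_map_keys _ hnd ([] : List Int), hkeys]
    unfold merge_columnar_records_py_alt
    simp only [PySem.List.dedup_eq_ofList]
    refine List.map_congr_left ?_
    intro k _
    have hv : ((first :: rest).foldl F d0).getD k [] =
        (first :: rest).flatMap (fun rec =>
          (pvCols rec).flatMap (fun kv => if kv.1 == k then kv.2 else [])) := by
      rw [hF, pv_getD_outer, hd0, pv_getD_init _ _ _ (PySem.Dict.getD_empty _ _),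
          List.nil_append]
    rw [hv]

-- ===== VERDICT =====
-- (theorem above states Claim_equal_merge_columnar_records_py by name)
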